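-- pv_equiv track=rewrite | github.com/DuaneLft/LaunchSchool | PY101/smallproblemseasy3/duplicate_erase.py | duplicate_erase
-- ===== SOURCE A (Python) =====
-- def duplicate_erase(str):
--     new_str = ''
--     index = 0
--     while index < len(str):
--         if index == len(str) - 1 or str[index] != str[index + 1]:
--             new_str += str[index]
--         index += 1
--     return new_str
-- ===== SOURCE B (Python) =====
-- def _merge(left, right):
--     """Join two already-collapsed halves, fusing a duplicate at the seam."""
--     if left and right and left[-1] == right[0]:
--         return left + right[1:]
--     return left + right
--
--
-- def duplicate_erase(str):
--     if len(str) <= 1: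
--         return str
--     mid = len(str) // 2
--     return _merge(duplicate_erase(str[:mid]), duplicate_erase(str[mid:]))
-- ===== Notes on version B (the rewrite author's own statement) =====
-- stated objective: alternative
-- what changed: Replaces A's single index+lookahead while-loop with repeated string concatenation by a divide-and-conquer recursion: split the string in half, collapse each half independently, then merge the halves fusing an equal pair at the seam.
import Mathlib
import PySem

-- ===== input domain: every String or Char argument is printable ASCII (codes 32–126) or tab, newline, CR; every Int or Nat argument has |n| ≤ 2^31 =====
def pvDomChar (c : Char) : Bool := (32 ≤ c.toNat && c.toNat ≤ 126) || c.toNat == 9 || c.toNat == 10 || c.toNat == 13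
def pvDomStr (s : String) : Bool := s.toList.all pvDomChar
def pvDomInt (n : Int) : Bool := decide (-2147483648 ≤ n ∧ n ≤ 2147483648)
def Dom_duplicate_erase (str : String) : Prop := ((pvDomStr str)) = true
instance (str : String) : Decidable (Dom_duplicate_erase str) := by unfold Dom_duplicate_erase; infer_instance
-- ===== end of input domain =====

-- B collapses adjacent duplicates by divide-and-conquer (split, recurse, merge at the seam)
-- instead of A's index+lookahead scan; alternative algorithm, same result.
-- ===== PORT A =====
-- A's while-loop over indices: keep str[index] when index is last or str[index] != str[index+1].
-- Transcribed as recursion on the character list with a one-character lookahead (same test, same order).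
def dupEraseA : List Char → List Char
  | [] => []
  | [c] => [c]
  | c :: d :: rest =>
    if c ≠ d then c :: dupEraseA (d :: rest) else dupEraseA (d :: rest)

def duplicate_erase (str : String) : String := String.ofList (dupEraseA str.toList)

-- ===== PORT B =====
-- Source B's _merge: join two collapsed halves, fusing an equal pair at the seam.
def dupMerge (l r : List Char) : List Char :=
  match l.getLast?, r with
  | some a, b :: bs => if a = b then l ++ bs else l ++ r
  | _, _ => l ++ r

-- Source B's duplicate_erase: length ≤ 1 is returned as is; otherwise split at len//2,
-- recurse on each half, merge.
def dupEraseB : List Char → List Char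
  | [] => []
  | [c] => [c]
  | c :: d :: rest =>
    let cs := c :: d :: rest
    let m := cs.length / 2
    dupMerge (dupEraseB (cs.take m)) (dupEraseB (cs.drop m))
termination_by cs => cs.length
decreasing_by
  · simp only [List.length_take, List.length_cons]; omega
  · simp only [List.length_drop, List.length_cons]; omega

def duplicate_erase_alt (str : String) : String := String.ofList (dupEraseB str.toList)

-- ===== PRECONDITION & SPEC =====
def Spec_duplicate_erase (str : String) (out : String) : Prop := out = duplicate_erase_alt str
instance (str : String) (out : String) : Decidable (Spec_duplicate_erase str out) := by unfold Spec_duplicate_erase; infer_instance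

-- ===== CLAIM (what is proved, stated in full; the proofs are below) =====
def Claim_equal_duplicate_erase : Prop := ∀ (str : String), Dom_duplicate_erase str → Spec_duplicate_erase str (duplicate_erase str)

-- ===== LEMMAS AND PROOFS =====

-- A on a nonempty list is nonempty and keeps the head character.
theorem dupEraseA_cons : ∀ (cs : List Char) (c : Char), ∃ t, dupEraseA (c :: cs) = c :: t
  | [], c => ⟨[], rfl⟩
  | d :: rest, c => by
    obtain ⟨t, ht⟩ := dupEraseA_cons rest d
    by_cases h : c = d
    · subst h; exact ⟨t, by simp [dupEraseA, ht]⟩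
    · exact ⟨dupEraseA (d :: rest), by simp [dupEraseA, h]⟩

-- dupMerge distributes over a cons on the left when the left tail is nonempty.
theorem dupMerge_cons (c x : Char) (xs : List Char) (r : List Char) :
    dupMerge (c :: x :: xs) r = c :: dupMerge (x :: xs) r := by
  cases h : (x :: xs).getLast? with
  | none => simp at h
  | some a =>
    cases r with
    | nil => simp [dupMerge, List.getLast?_cons_cons, h]
    | cons b bs =>
      by_cases hab : a = b <;>
        simp [dupMerge, List.getLast?_cons_cons, h, hab]

-- A splits over append exactly as dupMerge joins (the key divide-and-conquer law).
theorem dupEraseA_append : ∀ (xs ys : List Char),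
    dupEraseA (xs ++ ys) = dupMerge (dupEraseA xs) (dupEraseA ys)
  | [], ys => by
    cases ys <;> simp [dupEraseA, dupMerge]
  | [c], ys => by
    cases ys with
    | nil => simp [dupEraseA, dupMerge]
    | cons d rest =>
      obtain ⟨t, ht⟩ := dupEraseA_cons rest d
      by_cases h : c = d
      · subst h
        simp [dupEraseA, dupMerge, ht]
      · simp [dupEraseA, dupMerge, ht, h]
  | c :: d :: rest, ys => by
    have ih := dupEraseA_append (d :: rest) ys
    simp only [List.cons_append] at ih
    obtain ⟨t, ht⟩ := dupEraseA_cons rest d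
    by_cases h : c = d
    · subst h
      have e1 : dupEraseA (c :: c :: (rest ++ ys)) = dupEraseA (c :: (rest ++ ys)) := by
        simp [dupEraseA]
      have e2 : dupEraseA (c :: c :: rest) = dupEraseA (c :: rest) := by
        simp [dupEraseA]
      simp only [List.cons_append, e1, e2]
      exact ih
    · have e1 : dupEraseA (c :: d :: (rest ++ ys)) = c :: dupEraseA (d :: (rest ++ ys)) := by
        simp [dupEraseA, h]
      have e2 : dupEraseA (c :: d :: rest) = c :: dupEraseA (d :: rest) := by
        simp [dupEraseA, h]
      simp only [List.cons_append]
      rw [e1, e2, ht, dupMerge_cons, ← ht, ← ih]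
termination_by xs _ => xs.length
decreasing_by simp only [List.length_cons]; omega

-- B computes the same list as A.
theorem dupErase_eq : ∀ (cs : List Char), dupEraseB cs = dupEraseA cs
  | [] => by simp [dupEraseB, dupEraseA]
  | [c] => by simp [dupEraseB, dupEraseA]
  | c :: d :: rest => by
    have hm : (c :: d :: rest).length / 2 < (c :: d :: rest).length := by
      simp only [List.length_cons]; omega
    have h1 : dupEraseB ((c :: d :: rest).take ((c :: d :: rest).length / 2))
        = dupEraseA ((c :: d :: rest).take ((c :: d :: rest).length / 2)) :=
      dupErase_eq _
    have h2 : dupEraseB ((c :: d :: rest).drop ((c :: d :: rest).length / 2))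
        = dupEraseA ((c :: d :: rest).drop ((c :: d :: rest).length / 2)) :=
      dupErase_eq _
    rw [dupEraseB, h1, h2, ← dupEraseA_append, List.take_append_drop]
termination_by cs => cs.length
decreasing_by
  · simp only [List.length_take, List.length_cons]; omega
  · simp only [List.length_drop, List.length_cons]; omega

-- ===== VERDICT (by name: the statement is the Claim_ definition above) =====
theorem duplicate_erase_spec : Claim_equal_duplicate_erase := by
  intro str _
  unfold Spec_duplicate_erase duplicate_erase duplicate_erase_alt
  rw [dupErase_eq]
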